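-- pv_equiv track=rewrite | github.com/plutowang/solves_algorithms | codderbyte/solution.py | KaprekarsConstant
-- ===== SOURCE A (Python) =====
-- def KaprekarsConstant(num):
--     """Have the function KaprekarsConstant(num) take the num parameter
--     being passed which will be a 4-digit number with at least two distinct
--     digits. Your program should perform the following routine on the
--     number: Arrange the digits in descending order and in ascending
--     order (adding zeroes to fit it to a 4-digit number), and subtract
--     the smaller number from the bigger number. Then repeat the previous
--     step. Performing this routine will always cause you to reach a fixed
--     number: 6174. Then performing the routine on 6174 will always give you
--     6174 (7641 - 1467 = 6174). Your program should return the number of times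
--     this routine must be performed until 6174 is reached.
--     For example: if num is 3524 your program should return 3 because of
--     the following steps:
--     (1) 5432 - 2345 = 3087,
--     (2) 8730 - 0378 = 8352,
--     (3) 8532 - 2358 = 6174.
--     """
--     # code goes here
--
--     def kaprekars_helper(num, count):
--         num = [num for num in str(num)]
--         while len(num) < 4:
--             num.append('0')
--         num.sort()
--         x = int(''.join(num))
--         y = int(''.join(num[::-1]))
--         diff = abs(x-y)
--         if diff != 6174:
--             return kaprekars_helper(diff, count+1)
--         return count
--     return kaprekars_helper(num, 1)
-- ===== SOURCE B (Python) =====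
-- def _kaprekar_step(n):
--     asc = ''.join(sorted(str(n).zfill(4)))
--     return abs(int(asc) - int(asc[::-1]))
--
--
-- def KaprekarsConstant(num):
--     count = 1
--     n = _kaprekar_step(num)
--     while n != 6174:
--         n = _kaprekar_step(n)
--         count += 1
--     return count
-- ===== Notes on version B (the rewrite author's own statement) =====
-- stated objective: simpler
-- what changed: Replaces the recursive helper (pad-right, sort, recurse with count+1) by a small one-step function (zfill-pad, sort) plus an iterative while-loop that counts steps until 6174.
import Mathlib
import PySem

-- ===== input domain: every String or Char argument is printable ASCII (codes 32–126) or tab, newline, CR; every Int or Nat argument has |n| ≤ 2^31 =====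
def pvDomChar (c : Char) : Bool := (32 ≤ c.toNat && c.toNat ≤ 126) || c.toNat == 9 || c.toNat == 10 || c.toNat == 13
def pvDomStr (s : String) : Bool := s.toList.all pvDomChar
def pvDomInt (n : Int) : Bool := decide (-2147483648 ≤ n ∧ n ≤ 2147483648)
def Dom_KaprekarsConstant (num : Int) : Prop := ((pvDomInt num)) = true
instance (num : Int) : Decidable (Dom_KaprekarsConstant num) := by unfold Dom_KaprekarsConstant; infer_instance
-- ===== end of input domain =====

-- B replaces A's recursive helper by a small step function plus an iterative counting loop (different decomposition; no speed claim).


-- ===== PORT A =====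
-- while len(num) < 4: num.append('0')
def padWhile (l : List Char) : List Char :=
  if l.length < 4 then padWhile (l ++ ['0']) else l
  termination_by 4 - l.length
  decreasing_by simp_all; omega

-- the recursive helper; fuel bounds the recursion depth (≤ 7 steps suffice on Pre_; 16 is ample),
-- none = fuel exhausted or int() raised (never inside Pre_)
def kaprekarsHelper : Nat → Int → Int → Option Int
  | 0, _, _ => none
  | f + 1, num, count =>
    let ds := PySem.List.sorted (padWhile (PySem.Int.toChars num)) (fun c => c) false
    match PySem.Int.ofChars? ds, PySem.Int.ofChars? ds.reverse with
    -- ds.reverse is num[::-1] (PySem.List.slice?_none_none_neg_one)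
    | some x, some y =>
      let diff := |x - y|
      if diff ≠ 6174 then kaprekarsHelper f diff (count + 1) else some count
    | _, _ => none

def KaprekarsConstant (num : Int) : Int := (kaprekarsHelper 16 num 1).getD 0

-- ===== PORT B =====
-- one Kaprekar step: asc = ''.join(sorted(str(n).zfill(4))); abs(int(asc) - int(asc[::-1]))
def kaprekarStep (n : Int) : Option Int :=
  let s := PySem.Int.toChars n
  let asc := PySem.List.sorted (List.replicate (4 - s.length) '0' ++ s) (fun c => c) false
  -- str.zfill(4) = left-pad with '0' to length 4 (exact for the sign-free strings str(n) yields here)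
  match PySem.Int.ofChars? asc, PySem.Int.ofChars? asc.reverse with
  | some a, some b => some |a - b|
  | _, _ => none

-- while n != 6174: n = step(n); count += 1   (fuel-bounded loop)
def kaprekarLoop : Nat → Int → Int → Option Int
  | 0, _, _ => none
  | f + 1, n, count =>
    if n = 6174 then some count
    else
      match kaprekarStep n with
      | some d => kaprekarLoop f d (count + 1)
      | none => none

def KaprekarsConstant_alt (num : Int) : Int :=
  match kaprekarStep num with
  | some n => (kaprekarLoop 16 n 1).getD 0
  | none => 0

-- ===== PRECONDITION & SPEC =====
-- Pre_ excludes exactly the inputs on which Python A never returns: negative numbers (int() raises a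
-- ValueError on the reversed sign character), and zero, four-digit repdigits and numbers of five or
-- more digits, whose routine can never reach Kaprekar's constant, so A recurses forever (RecursionError).
def Pre_KaprekarsConstant (num : Int) : Prop := 1 ≤ num ∧ num ≤ 9999 ∧ num % 1111 ≠ 0
instance (num : Int) : Decidable (Pre_KaprekarsConstant num) := by unfold Pre_KaprekarsConstant; infer_instance
def pvWitness_KaprekarsConstant : Int := (3524)

def Spec_KaprekarsConstant (num : Int) (out : Int) : Prop := out = KaprekarsConstant_alt num
instance (num : Int) (out : Int) : Decidable (Spec_KaprekarsConstant num out) := by unfold Spec_KaprekarsConstant; infer_instance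

-- ===== CLAIM (what is proved, stated in full; the proofs are below) =====
def Claim_equal_KaprekarsConstant : Prop := ∀ (num : Int), Dom_KaprekarsConstant num → Pre_KaprekarsConstant num → Spec_KaprekarsConstant num (KaprekarsConstant num)

-- ===== LEMMAS AND PROOFS =====

-- A's right-pad loop appends exactly the missing zeroes
lemma padWhile_eq (l : List Char) : padWhile l = l ++ List.replicate (4 - l.length) '0' := by
  fun_induction padWhile l with
  | case1 l h ih =>
      rw [ih]
      have h4 : 4 - l.length = (4 - (l ++ ['0']).length) + 1 := by simp; omega
      rw [h4, List.append_assoc]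
      simp [List.replicate_succ]
  | case2 l h =>
      have : 4 - l.length = 0 := by omega
      simp [this]

-- right-padding then sorting = left-padding then sorting (same multiset, one sorted order)
lemma sorted_pad_eq (l : List Char) :
    PySem.List.sorted (padWhile l) (fun c => c) false
      = PySem.List.sorted (List.replicate (4 - l.length) '0' ++ l) (fun c => c) false := by
  rw [padWhile_eq]
  apply PySem.List.sorted_id_eq_of_perm_of_pairwise
  · exact (PySem.List.sorted_perm _ _ _).trans List.perm_append_comm
  · exact PySem.List.sorted_pairwise _ _

-- both sides perform the same step
lemma step_eq (n : Int) :
    kaprekarStep n =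
      (match PySem.Int.ofChars? (PySem.List.sorted (padWhile (PySem.Int.toChars n)) (fun c => c) false),
             PySem.Int.ofChars? (PySem.List.sorted (padWhile (PySem.Int.toChars n)) (fun c => c) false).reverse with
       | some x, some y => some |x - y|
       | _, _ => none) := by
  simp only [kaprekarStep, sorted_pad_eq]

-- the recursion and the loop compute the same option, step by step
lemma helper_eq_loop (f : Nat) : ∀ (n c : Int),
    kaprekarsHelper f n c = (kaprekarStep n).bind (fun d => kaprekarLoop f d c) := by
  induction f with
  | zero =>
      intro n c
      rcases kaprekarStep n with _ | d <;> simp [kaprekarsHelper, kaprekarLoop]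
  | succ f ih =>
      intro n c
      rw [kaprekarsHelper, step_eq n]
      rcases hx : PySem.Int.ofChars? (PySem.List.sorted (padWhile (PySem.Int.toChars n)) (fun c => c) false) with _ | x
      · simp
      rcases hy : PySem.Int.ofChars? (PySem.List.sorted (padWhile (PySem.Int.toChars n)) (fun c => c) false).reverse with _ | y
      · simp
      simp only [Option.bind_some]
      rw [kaprekarLoop]
      by_cases hd : |x - y| = 6174
      · simp [hd]
      · simp [hd, ih]
        rcases kaprekarStep |x - y| with _ | d <;> simp

-- ===== VERDICT (by name: the statement is the Claim_ definition above) =====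
theorem KaprekarsConstant_spec : Claim_equal_KaprekarsConstant := by
  intro num _ _
  unfold Spec_KaprekarsConstant KaprekarsConstant KaprekarsConstant_alt
  rw [helper_eq_loop]
  rcases kaprekarStep num with _ | d <;> simp
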